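-- pv_equiv track=rewrite | github.com/MNJUYDV/sentinel | rag/decision.py | is_ambiguous
-- ===== SOURCE A (Python) =====
-- from typing import Dict, List, Optional, Tuple
--
-- def is_ambiguous(query: str) -> Tuple[bool, Optional[str]]:
--     """
--     Check if query is ambiguous and needs clarification.
--
--     Args:
--         query: User query string
--
--     Returns:
--         Tuple of (is_ambiguous: bool, clarifying_question: Optional[str])
--     """
--     query_lower = query.lower()
--
--     # Check for "can we" / "is it allowed" patterns without scope
--     permission_patterns = ["can we", "can i", "is it allowed", "is allowed", "may we", "may i"]
--     scope_keywords = ["plan", "subscription", "region", "timeframe", "account", "tier", "date"]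
--
--     has_permission_pattern = any(pattern in query_lower for pattern in permission_patterns)
--     has_scope = any(keyword in query_lower for keyword in scope_keywords)
--
--     if has_permission_pattern and not has_scope:
--         return (True, "Could you clarify which plan type, region, or timeframe you're asking about?")
--
--     # Check for "current" / "latest" without date context
--     temporal_patterns = ["current", "latest", "now", "today"]
--     date_keywords = ["2024", "2025", "january", "february", "march", "april", "may", "june",
--                      "july", "august", "september", "october", "november", "december",
--                      "q1", "q2", "q3", "q4"]
--
--     has_temporal = any(pattern in query_lower for pattern in temporal_patterns)
--     has_date = any(keyword in query_lower for keyword in date_keywords)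
--
--     if has_temporal and not has_date:
--         # Check if it's asking about current state vs historical
--         if "when" not in query_lower and "date" not in query_lower:
--             return (True, "Could you specify the timeframe or date you're interested in?")
--
--     # Check for vague action queries
--     vague_actions = ["downgrade", "upgrade", "cancel", "change"]
--     if any(action in query_lower for action in vague_actions):
--         # Check if there's enough context about what's being changed
--         context_keywords = ["plan", "subscription", "service", "tier", "feature"]
--         if not any(keyword in query_lower for keyword in context_keywords):
--             return (True, "Could you clarify what you'd like to change or modify?")
--
--     return (False, None)
-- ===== SOURCE B (Python) =====
-- _PERMISSION = ["can we", "can i", "is it allowed", "is allowed", "may we", "may i"]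
-- _SCOPE = ["plan", "subscription", "region", "timeframe", "account", "tier", "date"]
-- _TEMPORAL = ["current", "latest", "now", "today"]
-- _DATE = ["2024", "2025", "january", "february", "march", "april", "may", "june",
--          "july", "august", "september", "october", "november", "december",
--          "q1", "q2", "q3", "q4"]
-- _VAGUE = ["downgrade", "upgrade", "cancel", "change"]
-- _CONTEXT = ["plan", "subscription", "service", "tier", "feature"]
--
-- # every keyword any rule mentions, collected once
-- _ALL = _PERMISSION + _SCOPE + _TEMPORAL + _DATE + _VAGUE + _CONTEXT + ["when"]
--
--
-- def is_ambiguous(query):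
--     ql = query.lower()
--     # one scan over the text: at each position, record which keywords match there
--     # (a naive multi-pattern matcher), then classify from the matched set alone
--     found = set()
--     for i in range(len(ql)):
--         for k in _ALL:
--             if ql.startswith(k, i):
--                 found.add(k)
--     hit = lambda ws: any(w in found for w in ws)
--     if hit(_PERMISSION) and not hit(_SCOPE):
--         return (True, "Could you clarify which plan type, region, or timeframe you're asking about?")
--     if hit(_TEMPORAL) and not hit(_DATE) and "when" not in found and "date" not in found:
--         return (True, "Could you specify the timeframe or date you're interested in?")
--     if hit(_VAGUE) and not hit(_CONTEXT):
--         return (True, "Could you clarify what you'd like to change or modify?")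
--     return (False, None)
-- ===== Notes on version B (the rewrite author's own statement) =====
-- stated objective: alternative
-- what changed: Instead of A's three if-blocks each scanning the query once per keyword with 'in', B makes one left-to-right scan of the query, collecting at each position every keyword that matches there (a naive multi-pattern matcher) into a set, and then classifies from that matched set alone with a flat rule chain.
import Mathlib
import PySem

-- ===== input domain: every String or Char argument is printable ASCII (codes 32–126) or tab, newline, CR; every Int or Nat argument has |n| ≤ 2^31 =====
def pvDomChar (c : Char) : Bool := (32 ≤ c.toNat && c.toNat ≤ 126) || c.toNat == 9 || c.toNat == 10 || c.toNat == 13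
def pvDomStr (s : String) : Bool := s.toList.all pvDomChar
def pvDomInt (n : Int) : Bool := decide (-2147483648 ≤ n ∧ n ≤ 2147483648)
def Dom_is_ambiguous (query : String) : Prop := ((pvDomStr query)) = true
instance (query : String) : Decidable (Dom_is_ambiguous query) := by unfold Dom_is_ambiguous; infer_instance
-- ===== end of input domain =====

-- B replaces A's per-keyword substring scans by ONE left-to-right scan of the query that collects all matching keywords (naive multi-pattern matcher), then classifies from the matched set; alternative structure, same behaviour.


-- ===== PORT A =====
-- Literal port of A: three hand-written keyword checks in sequence.
def is_ambiguous (query : String) : Bool × Option String :=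
  let query_lower := PySem.Str.lower query
  let permission_patterns := ["can we", "can i", "is it allowed", "is allowed", "may we", "may i"]
  let scope_keywords := ["plan", "subscription", "region", "timeframe", "account", "tier", "date"]
  let has_permission_pattern := permission_patterns.any (fun p => PySem.Str.isIn p query_lower)
  let has_scope := scope_keywords.any (fun k => PySem.Str.isIn k query_lower)
  if has_permission_pattern && !has_scope then
    (true, some "Could you clarify which plan type, region, or timeframe you're asking about?")
  else
    let temporal_patterns := ["current", "latest", "now", "today"]
    let date_keywords := ["2024", "2025", "january", "february", "march", "april", "may", "june", "july", "august", "september", "october", "november", "december", "q1", "q2", "q3", "q4"]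
    let has_temporal := temporal_patterns.any (fun p => PySem.Str.isIn p query_lower)
    let has_date := date_keywords.any (fun k => PySem.Str.isIn k query_lower)
    -- the code after the temporal block (the vague-action check and the final return),
    -- reached on fallthrough from either branch of the temporal check
    let rest : Bool × Option String :=
      if (["downgrade", "upgrade", "cancel", "change"]).any (fun a => PySem.Str.isIn a query_lower) then
        if !((["plan", "subscription", "service", "tier", "feature"]).any (fun k => PySem.Str.isIn k query_lower)) then
          (true, some "Could you clarify what you'd like to change or modify?")
        else (false, none)
      else (false, none)
    if has_temporal && !has_date then
      if !(PySem.Str.isIn "when" query_lower) && !(PySem.Str.isIn "date" query_lower) then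
        (true, some "Could you specify the timeframe or date you're interested in?")
      else rest
    else rest

-- ===== PORT B =====
-- B's keyword tables (Source B's module constants)
def pvPermission : List String := ["can we", "can i", "is it allowed", "is allowed", "may we", "may i"]
def pvScope : List String := ["plan", "subscription", "region", "timeframe", "account", "tier", "date"]
def pvTemporal : List String := ["current", "latest", "now", "today"]
def pvDate : List String := ["2024", "2025", "january", "february", "march", "april", "may", "june", "july", "august", "september", "october", "november", "december", "q1", "q2", "q3", "q4"]
def pvVague : List String := ["downgrade", "upgrade", "cancel", "change"]
def pvContext : List String := ["plan", "subscription", "service", "tier", "feature"]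
def pvAll : List String := pvPermission ++ pvScope ++ pvTemporal ++ pvDate ++ pvVague ++ pvContext ++ ["when"]

-- Source B's scan loop: for i in range(len(ql)): for k in _ALL: if ql.startswith(k, i): found.add(k)
-- ql.startswith(k, i) with i drawn from range(len(ql)) (so 0 ≤ i) is exactly a prefix test on the i-th suffix
def pvFound (l : List Char) : PySem.Set String :=
  (PySem.List.pyRange 0 l.length 1).foldl
    (fun f i => pvAll.foldl
      (fun f k => if PySem.Chars.startswith (l.drop i.toNat) k.toList then PySem.Set.add f k else f) f)
    PySem.Set.empty

def is_ambiguous_alt (query : String) : Bool × Option String :=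
  let ql := PySem.Str.lower query
  let found := pvFound ql.toList
  let hit := fun (ws : List String) => ws.any (fun w => PySem.Set.contains found w)
  if hit pvPermission && !hit pvScope then
    (true, some "Could you clarify which plan type, region, or timeframe you're asking about?")
  else if hit pvTemporal && !hit pvDate && !PySem.Set.contains found "when" && !PySem.Set.contains found "date" then
    (true, some "Could you specify the timeframe or date you're interested in?")
  else if hit pvVague && !hit pvContext then
    (true, some "Could you clarify what you'd like to change or modify?")
  else
    (false, none)

-- ===== PRECONDITION & SPEC =====
def Spec_is_ambiguous (query : String) (out : Bool × Option String) : Prop := out = is_ambiguous_alt query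
instance (query : String) (out : Bool × Option String) : Decidable (Spec_is_ambiguous query out) := by unfold Spec_is_ambiguous; infer_instance

-- ===== CLAIM (what is proved, stated in full; the proofs are below) =====
def Claim_equal_is_ambiguous : Prop := ∀ (query : String), Dom_is_ambiguous query → Spec_is_ambiguous query (is_ambiguous query)

-- ===== LEMMAS AND PROOFS =====
-- membership through the inner keyword loop at one position
theorem pv_inner_mem (ks : List String) (suf : List Char) (f : PySem.Set String) (x : String) :
    (x ∈ ks.foldl (fun f k => if PySem.Chars.startswith suf k.toList then PySem.Set.add f k else f) f)
      ↔ x ∈ f ∨ (x ∈ ks ∧ PySem.Chars.startswith suf x.toList = true) := by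
  induction ks generalizing f with
  | nil => simp
  | cons k ks ih =>
    simp only [List.foldl_cons]
    by_cases h : PySem.Chars.startswith suf k.toList = true
    · rw [if_pos h, ih]
      simp only [PySem.Set.mem_add, List.mem_cons]
      constructor
      · rintro (( hx | rfl) | ⟨hx, hs⟩)
        · exact Or.inl hx
        · exact Or.inr ⟨Or.inl rfl, h⟩
        · exact Or.inr ⟨Or.inr hx, hs⟩
      · rintro (hx | ⟨(rfl | hx), hs⟩)
        · exact Or.inl (Or.inl hx)
        · exact Or.inl (Or.inr rfl)
        · exact Or.inr ⟨hx, hs⟩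
    · rw [if_neg h, ih]
      simp only [List.mem_cons]
      constructor
      · rintro (hx | ⟨hx, hs⟩)
        · exact Or.inl hx
        · exact Or.inr ⟨Or.inr hx, hs⟩
      · rintro (hx | ⟨(rfl | hx), hs⟩)
        · exact Or.inl hx
        · exact absurd hs h
        · exact Or.inr ⟨hx, hs⟩

-- membership through the outer position loop
theorem pv_outer_mem (l : List Char) (is : List Int) (f : PySem.Set String) (x : String) :
    (x ∈ is.foldl (fun f i => pvAll.foldl
        (fun f k => if PySem.Chars.startswith (l.drop i.toNat) k.toList then PySem.Set.add f k else f) f) f)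
      ↔ x ∈ f ∨ (x ∈ pvAll ∧ ∃ i ∈ is, PySem.Chars.startswith (l.drop i.toNat) x.toList = true) := by
  induction is generalizing f with
  | nil => simp
  | cons i is ih =>
    simp only [List.foldl_cons]
    rw [ih]
    simp only [pv_inner_mem, List.mem_cons]
    constructor
    · rintro ((hx | ⟨hk, hs⟩) | ⟨hk, j, hj, hs⟩)
      · exact Or.inl hx
      · exact Or.inr ⟨hk, i, Or.inl rfl, hs⟩
      · exact Or.inr ⟨hk, j, Or.inr hj, hs⟩
    · rintro (hx | ⟨hk, j, (rfl | hj), hs⟩)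
      · exact Or.inl (Or.inl hx)
      · exact Or.inl (Or.inr ⟨hk, hs⟩)
      · exact Or.inr ⟨hk, j, hj, hs⟩

-- the matched set contains a (nonempty) table keyword iff it occurs as a substring
theorem pv_found_contains (l : List Char) (k : String) (hk : k ∈ pvAll) (hne : k.toList ≠ []) :
    PySem.Set.contains (pvFound l) k = PySem.Chars.isIn k.toList l := by
  rw [Bool.eq_iff_iff, PySem.Set.contains_iff]
  unfold pvFound
  rw [pv_outer_mem]
  constructor
  · rintro (h | ⟨_, i, _, hs⟩)
    · simp [PySem.Set.empty] at h
    · rw [← PySem.Chars.exists_prefix_drop_iff_isIn]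
      exact ⟨i.toNat, (PySem.Chars.startswith_iff _ _).mp hs⟩
  · intro h
    obtain ⟨j, hj⟩ := (PySem.Chars.exists_prefix_drop_iff_isIn k.toList l).mpr h
    have hjl : j < l.length := by
      rcases Nat.lt_or_ge j l.length with h' | h'
      · exact h'
      · rw [List.drop_eq_nil_of_le h'] at hj
        exact absurd (List.prefix_nil.mp hj) hne
    refine Or.inr ⟨hk, (j : Int), ?_, ?_⟩
    · rw [PySem.List.mem_pyRange_one]
      exact ⟨Int.natCast_nonneg j, by exact_mod_cast hjl⟩
    · rw [PySem.Chars.startswith_iff]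
      simpa using hj

-- one keyword at String level
theorem pv_contains_str (s : String) (k : String) (hk : k ∈ pvAll ∧ k.toList ≠ []) :
    PySem.Set.contains (pvFound s.toList) k = PySem.Str.isIn k s := by
  rw [pv_found_contains s.toList k hk.1 hk.2, PySem.Str.isIn_eq]

-- any-of-contains over a table equals any-of-substring (lifting pv_contains_str over a list)
theorem pv_hit_eq (s : String) (ws : List String)
    (hws : ∀ k ∈ ws, k ∈ pvAll ∧ k.toList ≠ []) :
    (ws.any (fun w => PySem.Set.contains (pvFound s.toList) w))
      = ws.any (fun w => PySem.Str.isIn w s) := by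
  induction ws with
  | nil => rfl
  | cons w ws ih =>
    simp only [List.any_cons, pv_contains_str s w (hws w (List.mem_cons_self ..)),
      ih (fun k hk => hws k (List.mem_cons_of_mem _ hk))]

-- each table's keywords sit inside pvAll and are nonempty
theorem pv_ne_perm : ∀ k ∈ pvPermission, k.toList ≠ [] := by
  intro k hk
  simp only [pvPermission, List.mem_cons, List.not_mem_nil, or_false] at hk
  rcases hk with rfl|rfl|rfl|rfl|rfl|rfl <;> decide

theorem pv_mem_perm : ∀ k ∈ pvPermission, k ∈ pvAll := by
  intro k hk
  unfold pvAll
  exact List.mem_append_left _ (List.mem_append_left _ (List.mem_append_left _ (List.mem_append_left _ (List.mem_append_left _ (List.mem_append_left _ (hk))))))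

theorem pv_sub_perm : ∀ k ∈ pvPermission, k ∈ pvAll ∧ k.toList ≠ [] :=
  fun k hk => ⟨pv_mem_perm k hk, pv_ne_perm k hk⟩

theorem pv_ne_scope : ∀ k ∈ pvScope, k.toList ≠ [] := by
  intro k hk
  simp only [pvScope, List.mem_cons, List.not_mem_nil, or_false] at hk
  rcases hk with rfl|rfl|rfl|rfl|rfl|rfl|rfl <;> decide

theorem pv_mem_scope : ∀ k ∈ pvScope, k ∈ pvAll := by
  intro k hk
  unfold pvAll
  exact List.mem_append_left _ (List.mem_append_left _ (List.mem_append_left _ (List.mem_append_left _ (List.mem_append_left _ (List.mem_append_right _ (hk))))))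

theorem pv_sub_scope : ∀ k ∈ pvScope, k ∈ pvAll ∧ k.toList ≠ [] :=
  fun k hk => ⟨pv_mem_scope k hk, pv_ne_scope k hk⟩

theorem pv_ne_temp : ∀ k ∈ pvTemporal, k.toList ≠ [] := by
  intro k hk
  simp only [pvTemporal, List.mem_cons, List.not_mem_nil, or_false] at hk
  rcases hk with rfl|rfl|rfl|rfl <;> decide

theorem pv_mem_temp : ∀ k ∈ pvTemporal, k ∈ pvAll := by
  intro k hk
  unfold pvAll
  exact List.mem_append_left _ (List.mem_append_left _ (List.mem_append_left _ (List.mem_append_left _ (List.mem_append_right _ (hk)))))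

theorem pv_sub_temp : ∀ k ∈ pvTemporal, k ∈ pvAll ∧ k.toList ≠ [] :=
  fun k hk => ⟨pv_mem_temp k hk, pv_ne_temp k hk⟩

theorem pv_ne_date : ∀ k ∈ pvDate, k.toList ≠ [] := by
  intro k hk
  simp only [pvDate, List.mem_cons, List.not_mem_nil, or_false] at hk
  rcases hk with rfl|rfl|rfl|rfl|rfl|rfl|rfl|rfl|rfl|rfl|rfl|rfl|rfl|rfl|rfl|rfl|rfl|rfl <;> decide

theorem pv_mem_date : ∀ k ∈ pvDate, k ∈ pvAll := by
  intro k hk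
  unfold pvAll
  exact List.mem_append_left _ (List.mem_append_left _ (List.mem_append_left _ (List.mem_append_right _ (hk))))

theorem pv_sub_date : ∀ k ∈ pvDate, k ∈ pvAll ∧ k.toList ≠ [] :=
  fun k hk => ⟨pv_mem_date k hk, pv_ne_date k hk⟩

theorem pv_ne_vague : ∀ k ∈ pvVague, k.toList ≠ [] := by
  intro k hk
  simp only [pvVague, List.mem_cons, List.not_mem_nil, or_false] at hk
  rcases hk with rfl|rfl|rfl|rfl <;> decide

theorem pv_mem_vague : ∀ k ∈ pvVague, k ∈ pvAll := by
  intro k hk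
  unfold pvAll
  exact List.mem_append_left _ (List.mem_append_left _ (List.mem_append_right _ (hk)))

theorem pv_sub_vague : ∀ k ∈ pvVague, k ∈ pvAll ∧ k.toList ≠ [] :=
  fun k hk => ⟨pv_mem_vague k hk, pv_ne_vague k hk⟩

theorem pv_ne_ctx : ∀ k ∈ pvContext, k.toList ≠ [] := by
  intro k hk
  simp only [pvContext, List.mem_cons, List.not_mem_nil, or_false] at hk
  rcases hk with rfl|rfl|rfl|rfl|rfl <;> decide

theorem pv_mem_ctx : ∀ k ∈ pvContext, k ∈ pvAll := by
  intro k hk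
  unfold pvAll
  exact List.mem_append_left _ (List.mem_append_right _ (hk))

theorem pv_sub_ctx : ∀ k ∈ pvContext, k ∈ pvAll ∧ k.toList ≠ [] :=
  fun k hk => ⟨pv_mem_ctx k hk, pv_ne_ctx k hk⟩

theorem pv_mem_when : "when" ∈ pvAll ∧ ("when" : String).toList ≠ [] := by
  constructor
  · unfold pvAll
    exact List.mem_append_right _ (List.mem_singleton.mpr rfl)
  · decide

theorem pv_mem_date2 : "date" ∈ pvAll ∧ ("date" : String).toList ≠ [] :=
  ⟨pv_mem_scope "date" (by simp [pvScope]), by decide⟩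

-- ===== VERDICT (by name: the statement is the Claim_ definition above) =====
-- the two control structures agree for every valuation of the eight keyword-group tests
theorem pv_chain (P S T D V C W DT : Bool) :
    (if P && !S then ((true, some "Could you clarify which plan type, region, or timeframe you're asking about?") : Bool × Option String)
     else
       let rest : Bool × Option String :=
         if V then
           (if !C then (true, some "Could you clarify what you'd like to change or modify?") else (false, none))
         else (false, none)
       if T && !D then
         (if !W && !DT then (true, some "Could you specify the timeframe or date you're interested in?") else rest)
       else rest)
    = (if P && !S then (true, some "Could you clarify which plan type, region, or timeframe you're asking about?")
       else if T && !D && !W && !DT then (true, some "Could you specify the timeframe or date you're interested in?")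
       else if V && !C then (true, some "Could you clarify what you'd like to change or modify?")
       else (false, none)) := by
  cases P <;> cases S <;> cases T <;> cases D <;> cases V <;> cases C <;> cases W <;> cases DT <;> rfl

set_option maxHeartbeats 1000000 in
theorem is_ambiguous_spec : Claim_equal_is_ambiguous := by
  intro q _
  show is_ambiguous q = is_ambiguous_alt q
  unfold is_ambiguous_alt
  simp only [pv_hit_eq (PySem.Str.lower q) pvPermission pv_sub_perm,
    pv_hit_eq (PySem.Str.lower q) pvScope pv_sub_scope,
    pv_hit_eq (PySem.Str.lower q) pvTemporal pv_sub_temp,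
    pv_hit_eq (PySem.Str.lower q) pvDate pv_sub_date,
    pv_hit_eq (PySem.Str.lower q) pvVague pv_sub_vague,
    pv_hit_eq (PySem.Str.lower q) pvContext pv_sub_ctx,
    pv_contains_str (PySem.Str.lower q) "when" pv_mem_when,
    pv_contains_str (PySem.Str.lower q) "date" pv_mem_date2]
  exact pv_chain
    (pvPermission.any (fun w => PySem.Str.isIn w (PySem.Str.lower q)))
    (pvScope.any (fun w => PySem.Str.isIn w (PySem.Str.lower q)))
    (pvTemporal.any (fun w => PySem.Str.isIn w (PySem.Str.lower q)))
    (pvDate.any (fun w => PySem.Str.isIn w (PySem.Str.lower q)))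
    (pvVague.any (fun w => PySem.Str.isIn w (PySem.Str.lower q)))
    (pvContext.any (fun w => PySem.Str.isIn w (PySem.Str.lower q)))
    (PySem.Str.isIn "when" (PySem.Str.lower q))
    (PySem.Str.isIn "date" (PySem.Str.lower q))
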